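-- pv_equiv track=rewrite | github.com/doozan/spanish_tools | build_sentences.py | group_tags
-- ===== SOURCE A (Python) =====
-- def group_tags(pos_tags):
--
--     res = {}
--     for item in pos_tags:
--         if not item:
--             continue
--         pos, wordtag = item
--         if pos not in res:
--             res[pos] = [wordtag]
--         else:
--             res[pos] += [wordtag]
--
--     for pos, words in res.items():
--         res[pos] = list(dict.fromkeys(words))
--
--     return res
-- ===== SOURCE B (Python) =====
-- def group_tags(pos_tags):
--     res = {}
--     for pos in dict.fromkeys(p for p, _ in pos_tags):
--         collected = []
--         for p, w in pos_tags:
--             if p == pos and w not in collected: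
--                 collected.append(w)
--         res[pos] = collected
--     return res
-- ===== Notes on version B (the rewrite author's own statement) =====
-- stated objective: alternative
-- what changed: B abandons A's single-pass dict grouping followed by a dict.fromkeys dedup pass: it first lists the distinct pos keys in first-appearance order, then for each key rescans pos_tags collecting that key's wordtags at their first occurrence (outer loop over keys, inner full scan).
import Mathlib
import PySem

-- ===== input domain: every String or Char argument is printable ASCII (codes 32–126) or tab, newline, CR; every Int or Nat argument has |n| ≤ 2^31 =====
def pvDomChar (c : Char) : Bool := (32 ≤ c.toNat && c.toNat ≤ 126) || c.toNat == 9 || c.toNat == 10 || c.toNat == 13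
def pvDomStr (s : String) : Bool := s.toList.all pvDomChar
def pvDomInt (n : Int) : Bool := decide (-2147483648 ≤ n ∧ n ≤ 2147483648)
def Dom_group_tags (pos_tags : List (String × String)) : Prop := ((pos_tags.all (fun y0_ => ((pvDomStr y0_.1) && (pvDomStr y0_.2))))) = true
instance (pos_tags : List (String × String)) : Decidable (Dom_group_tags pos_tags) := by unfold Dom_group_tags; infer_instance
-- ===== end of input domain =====

-- B replaces A's single-pass dict grouping (then a dict.fromkeys dedup pass) by nested scans:
-- an outer loop over the distinct pos keys and an inner rescan of pos_tags per key; same results.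

-- ===== PORT A =====
-- 'if not item: continue' never fires here: item is a 2-tuple (String × String), always truthy in Python,
-- and 'pos, wordtag = item' always succeeds; so the loop body just runs on every item.
def group_tags (pos_tags : List (String × String)) : List (String × List String) :=
  let res : PySem.Dict String (List String) :=
    pos_tags.foldl (fun res item =>
      let pos := item.1
      let wordtag := item.2
      if !(res.contains pos) then
        res.insert pos [wordtag]
      else
        -- res[pos] += [wordtag]; pos is present, so getD reads exactly res[pos]
        res.insert pos (res.getD pos [] ++ [wordtag])) PySem.Dict.empty
  -- for pos, words in res.items(): res[pos] = list(dict.fromkeys(words))  (only values change, keys untouched)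
  let res2 := res.items.foldl (fun d pw => d.insert pw.1 (PySem.List.dedup pw.2)) res
  res2.items

-- ===== PORT B =====
-- dict.fromkeys(p for p, _ in pos_tags) → PySem.List.dedup (pos_tags.map Prod.fst);
-- per key, the inner loop rescans pos_tags appending unseen matching wordtags.
def group_tags_alt (pos_tags : List (String × String)) : List (String × List String) :=
  (PySem.List.dedup (pos_tags.map Prod.fst)).map (fun pos =>
    let collected := pos_tags.foldl (fun collected pw =>
      if pw.1 == pos && !(collected.contains pw.2) then collected ++ [pw.2] else collected) []
    (pos, collected))

-- ===== PRECONDITION & SPEC =====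
def Spec_group_tags (pos_tags : List (String × String)) (out : List (String × List String)) : Prop := out = group_tags_alt pos_tags
instance (pos_tags : List (String × String)) (out : List (String × List String)) : Decidable (Spec_group_tags pos_tags out) := by unfold Spec_group_tags; infer_instance

-- ===== CLAIM (what is proved, stated in full; the proofs are below) =====
def Claim_equal_group_tags : Prop := ∀ (pos_tags : List (String × String)), Dom_group_tags pos_tags → Spec_group_tags pos_tags (group_tags pos_tags)

-- ===== LEMMAS AND PROOFS =====

-- A's first loop step, named, and its identification with Dict.modify
def stepA (res : PySem.Dict String (List String)) (item : String × String) :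
    PySem.Dict String (List String) :=
  if !(res.contains item.1) then res.insert item.1 [item.2]
  else res.insert item.1 (res.getD item.1 [] ++ [item.2])

lemma stepA_eq_modify : stepA = fun d (x : String × String) => d.modify x.1 [] (· ++ [x.2]) := by
  funext d x
  unfold stepA PySem.Dict.modify
  split <;> simp_all [PySem.Dict.getD_of_not_contains, PySem.Dict.getD_eq_get?_getD]

-- the canonical form both programs compute
def canon (pos_tags : List (String × String)) : List (String × List String) :=
  (PySem.Set.ofList (pos_tags.map Prod.fst)).map (fun pos =>
    (pos, PySem.List.dedup ((pos_tags.filter (fun p => p.1 == pos)).map Prod.snd)))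

-- ----- A's second pass: value lookups through the dedup-rewrite fold -----
lemma getD_fold_notmem (l : List (String × List String)) (d : PySem.Dict String (List String))
    (p : String) (h : p ∉ l.map Prod.fst) :
    (l.foldl (fun d pw => d.insert pw.1 (PySem.List.dedup pw.2)) d).getD p [] = d.getD p [] := by
  induction l generalizing d with
  | nil => rfl
  | cons x xs ih =>
    simp only [List.map_cons, List.mem_cons, not_or] at h
    simp only [List.foldl_cons]
    rw [ih _ h.2, PySem.Dict.getD_insert_of_ne d _ _ h.1]

lemma getD_fold_mem (l : List (String × List String)) (d : PySem.Dict String (List String))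
    (p : String) (ws : List String) (hnd : (l.map Prod.fst).Nodup) (hm : (p, ws) ∈ l) :
    (l.foldl (fun d pw => d.insert pw.1 (PySem.List.dedup pw.2)) d).getD p []
      = PySem.List.dedup ws := by
  induction l generalizing d with
  | nil => cases hm
  | cons x xs ih =>
    simp only [List.map_cons, List.nodup_cons] at hnd
    rcases List.mem_cons.mp hm with hm | hm
    · simp only [List.foldl_cons, ← hm]
      rw [getD_fold_notmem _ _ _ (by rw [← hm] at hnd; exact hnd.1)]
      exact PySem.Dict.getD_insert_self d p (PySem.List.dedup ws) []
    · exact ih _ hnd.2 hm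

-- ----- A equals the canonical form -----
lemma group_tags_eq_canon (pos_tags : List (String × String)) :
    group_tags pos_tags = canon pos_tags := by
  show ((pos_tags.foldl stepA PySem.Dict.empty).items.foldl
      (fun d pw => d.insert pw.1 (PySem.List.dedup pw.2))
      (pos_tags.foldl stepA PySem.Dict.empty)).items = canon pos_tags
  rw [stepA_eq_modify]
  set resA := pos_tags.foldl (fun d (x : String × String) => d.modify x.1 [] (· ++ [x.2]))
    PySem.Dict.empty with hresA
  have hkeys : resA.keys = PySem.Set.ofList (pos_tags.map Prod.fst) := by
    rw [hresA, PySem.Dict.keys_foldl_modify_key]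
    simp [PySem.Dict.keys_empty, PySem.Set.ofList_eq_foldl, PySem.Set.update]
  have hnd : resA.keys.Nodup := by rw [hkeys]; exact PySem.Set.nodup_ofList _
  have hgetD : ∀ c, resA.getD c [] = (pos_tags.filter (fun p => p.1 == c)).map Prod.snd := by
    intro c
    rw [hresA, PySem.Dict.getD_foldl_modify_append]
    simp [PySem.Dict.getD_empty]
  -- keys survive the second pass unchanged
  set res2 := resA.items.foldl (fun d pw => d.insert pw.1 (PySem.List.dedup pw.2)) resA with hres2
  have hkeys2 : res2.keys = resA.keys := by
    rw [hres2, PySem.Dict.keys_foldl_insert_key]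
    have h1 : resA.items.map Prod.fst = resA.keys := rfl
    rw [h1, PySem.Set.update_eq_append_filter]
    have h2 : (PySem.Set.ofList resA.keys).filter (fun y => !(PySem.Set.contains resA.keys y)) = [] := by
      apply List.filter_eq_nil_iff.mpr
      intro a ha
      simpa using (PySem.Set.mem_ofList _ _).mp ha
    rw [h2, List.append_nil]
  have hnd2 : res2.keys.Nodup := by rw [hkeys2]; exact hnd
  rw [PySem.Dict.items_eq_map_keys res2 hnd2 [], hkeys2, hkeys]
  unfold canon
  apply List.map_congr_left
  intro k hk
  have hkA : k ∈ resA.keys := by rw [hkeys]; exact hk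
  have hmem : (k, resA.getD k []) ∈ resA.items := by
    rw [PySem.Dict.items_eq_map_keys resA hnd []]
    exact List.mem_map_of_mem hkA
  have hndfst : (resA.items.map Prod.fst).Nodup := hnd
  rw [hres2, getD_fold_mem resA.items resA k (resA.getD k []) hndfst hmem, hgetD]

-- ----- B's inner loop: the seen-filter fold is Set-building over the filtered wordtags -----
lemma innerB_eq_fold_add (pos : String) (l : List (String × String)) (coll : List String) :
    l.foldl (fun collected pw =>
        if pw.1 == pos && !(collected.contains pw.2) then collected ++ [pw.2] else collected) coll
      = ((l.filter (fun p => p.1 == pos)).map Prod.snd).foldl PySem.Set.add coll := by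
  induction l generalizing coll with
  | nil => rfl
  | cons x xs ih =>
    by_cases hx : x.1 = pos
    · simp only [List.foldl_cons, List.filter_cons, hx, BEq.rfl, if_true, List.map_cons]
      rw [ih]
      congr 1
      rw [PySem.Set.add_eq_ite]
      by_cases hm : x.2 ∈ coll
      · simp [hm]
      · simp [hm]
    · have hx' : (x.1 == pos) = false := by simpa using hx
      simp only [List.foldl_cons, List.filter_cons, hx', Bool.false_and, Bool.false_eq_true,
        if_false]
      exact ih coll

-- ----- B equals the canonical form -----
lemma group_tags_alt_eq_canon (pos_tags : List (String × String)) :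
    group_tags_alt pos_tags = canon pos_tags := by
  unfold group_tags_alt canon
  rw [PySem.List.dedup_eq_ofList]
  apply List.map_congr_left
  intro pos _
  simp only
  rw [innerB_eq_fold_add, PySem.List.dedup_eq_ofList, PySem.Set.ofList_eq_foldl]

-- ===== VERDICT (by name: the statement is the Claim_ definition above) =====
theorem group_tags_spec : Claim_equal_group_tags := by
  intro pos_tags _
  show group_tags pos_tags = group_tags_alt pos_tags
  rw [group_tags_eq_canon, group_tags_alt_eq_canon]
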